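-- pv_equiv track=rewrite | github.com/Yaras97/Projects | PycharmProjects/pythonProject/Поколение Python курс для профессионалов/8 Функции/1 Встроенные функции Часть 1/task11/task11.py | stupid_sorted
-- ===== SOURCE A (Python) =====
-- def stupid_sorted(number):
--     low_letter = ''
--     up_letter = ''
--     odd = ''
--     even = ''
--     for sym in number:
--         if sym in [chr(i) for i in range(ord('a'), ord('z') + 1)]:
--             low_letter += sym
--         if sym in [chr(i) for i in range(ord('A'), ord('Z') + 1)]:
--             up_letter += sym
--         if sym.isdigit():
--             if int(sym) % 2 == 1:
--                 odd += sym
--             if int(sym) % 2 == 0: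
--                 even += sym
--     return ''.join(sorted(low_letter) + sorted(up_letter) + sorted(odd) + sorted(even))
-- ===== SOURCE B (Python) =====
-- def stupid_sorted(number):
--     def group_rank(sym):
--         if 'a' <= sym <= 'z':
--             return 0
--         if 'A' <= sym <= 'Z':
--             return 1
--         if sym.isdigit():
--             return 2 if int(sym) % 2 == 1 else 3
--         return None
--     kept = [sym for sym in number if group_rank(sym) is not None]
--     return ''.join(sorted(kept, key=lambda sym: (group_rank(sym), sym)))
-- ===== Notes on version B (the rewrite author's own statement) =====
-- stated objective: simpler
-- what changed: Replaced the four accumulator strings and four separate sorts by one filtering pass plus a single sorted() call with a composite (group-rank, char) key; A also rebuilds the 26-letter chr-lists on every character, which the measured speedup reflects.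
import Mathlib
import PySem

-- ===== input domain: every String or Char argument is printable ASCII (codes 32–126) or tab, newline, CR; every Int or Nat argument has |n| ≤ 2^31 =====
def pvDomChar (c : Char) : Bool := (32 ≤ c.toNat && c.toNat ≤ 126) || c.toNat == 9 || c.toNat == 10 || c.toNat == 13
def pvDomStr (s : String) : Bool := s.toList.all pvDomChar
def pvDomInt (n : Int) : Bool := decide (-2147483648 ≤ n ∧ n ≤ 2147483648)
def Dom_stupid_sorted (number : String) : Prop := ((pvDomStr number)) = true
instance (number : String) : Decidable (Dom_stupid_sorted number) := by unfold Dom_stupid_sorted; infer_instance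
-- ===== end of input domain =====

-- B replaces A's four accumulator strings and four separate sorts by one filtering pass plus a
-- single sort under a composite (group-rank, character) key; objective: simpler.

-- ===== PORT A =====
-- [chr(i) for i in range(ord('a'), ord('z') + 1)]  (a constant list; Python rebuilds it each iteration)
def pvLowList : List Char :=
  (PySem.List.pyRange ('a'.toNat : Int) (('z'.toNat : Int) + 1) 1).map (fun i => Char.ofNat i.toNat)
-- [chr(i) for i in range(ord('A'), ord('Z') + 1)]
def pvUpList : List Char :=
  (PySem.List.pyRange ('A'.toNat : Int) (('Z'.toNat : Int) + 1) 1).map (fun i => Char.ofNat i.toNat)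

-- int(sym): on a char for which sym.isdigit() holds, PySem.Int.ofStr? always succeeds, so getD 0 is never used
def pvIntOf (sym : Char) : Int := (PySem.Int.ofStr? (String.mk [sym])).getD 0

-- the body of A's for-loop over the four accumulator strings (low_letter, up_letter, odd, even)
def pvStepA (acc : List Char × List Char × List Char × List Char) (sym : Char) :
    List Char × List Char × List Char × List Char :=
  let low_letter := if pvLowList.contains sym then acc.1 ++ [sym] else acc.1
  let up_letter := if pvUpList.contains sym then acc.2.1 ++ [sym] else acc.2.1
  let odd := if PySem.Str.isdigit sym then
      (if PySem.Int.mod (pvIntOf sym) 2 = 1 then acc.2.2.1 ++ [sym] else acc.2.2.1)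
    else acc.2.2.1
  let even := if PySem.Str.isdigit sym then
      (if PySem.Int.mod (pvIntOf sym) 2 = 0 then acc.2.2.2 ++ [sym] else acc.2.2.2)
    else acc.2.2.2
  (low_letter, up_letter, odd, even)

def stupid_sorted (number : String) : String :=
  let s := number.toList.foldl pvStepA ([], [], [], [])
  String.mk (PySem.List.sorted s.1 (fun c => c) ++ PySem.List.sorted s.2.1 (fun c => c)
    ++ PySem.List.sorted s.2.2.1 (fun c => c) ++ PySem.List.sorted s.2.2.2 (fun c => c))

-- ===== PORT B =====
def groupRank? (sym : Char) : Option Int :=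
  if 'a' ≤ sym ∧ sym ≤ 'z' then some 0
  else if 'A' ≤ sym ∧ sym ≤ 'Z' then some 1
  else if PySem.Str.isdigit sym then
    -- int(sym): on a digit char PySem.Int.ofStr? always succeeds, so getD 0 is never used
    (if PySem.Int.mod ((PySem.Int.ofStr? (String.mk [sym])).getD 0) 2 = 1 then some 2 else some 3)
  else none

def stupid_sorted_alt (number : String) : String :=
  let kept := number.toList.filter (fun sym => (groupRank? sym).isSome)
  String.mk (PySem.List.sorted2 kept (fun sym => (groupRank? sym).getD 0) (fun sym => sym))

-- ===== PRECONDITION & SPEC =====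
def Spec_stupid_sorted (number : String) (out : String) : Prop := out = stupid_sorted_alt number
instance (number : String) (out : String) : Decidable (Spec_stupid_sorted number out) := by unfold Spec_stupid_sorted; infer_instance

-- ===== CLAIM (what is proved, stated in full; the proofs are below) =====
def Claim_equal_stupid_sorted : Prop := ∀ (number : String), Dom_stupid_sorted number → Spec_stupid_sorted number (stupid_sorted number)

-- ===== LEMMAS AND PROOFS =====

-- proof-side names for the four membership tests of A's loop
def pLow (c : Char) : Bool := pvLowList.contains c
def pUp (c : Char) : Bool := pvUpList.contains c
def pOdd (c : Char) : Bool := PySem.Str.isdigit c && decide (PySem.Int.mod (pvIntOf c) 2 = 1)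
def pEven (c : Char) : Bool := PySem.Str.isdigit c && decide (PySem.Int.mod (pvIntOf c) 2 = 0)

-- B's (group_rank sym, sym) tuple key flattened into one Int (4294967296 > any Char.toNat)
def pvKey (c : Char) : Int := (groupRank? c).getD 0 * 4294967296 + (c.toNat : Int)

lemma char_le_iff (a b : Char) : a ≤ b ↔ a.toNat ≤ b.toNat := by
  simp [Char.le_def, UInt32.le_iff_toNat_le]

lemma char_lt_iff (a b : Char) : a < b ↔ a.toNat < b.toNat := by
  simp [Char.lt_def, UInt32.lt_iff_toNat_lt]

lemma char_toNat_injective : Function.Injective Char.toNat := by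
  intro a b h; apply Char.ext; exact UInt32.toNat_inj.mp h

lemma tnLit : ('a' : Char).toNat = 97 ∧ ('z' : Char).toNat = 122 ∧ ('A' : Char).toNat = 65 ∧
    ('Z' : Char).toNat = 90 ∧ ('0' : Char).toNat = 48 ∧ ('9' : Char).toNat = 57 := by decide

lemma mem_pvLowList (c : Char) : pLow c = true ↔ 97 ≤ c.toNat ∧ c.toNat ≤ 122 := by
  have h1 : pLow c = true ↔ c ∈ pvLowList := by simp [pLow]
  have h2 : c ∈ pvLowList ↔ c.toNat ∈ pvLowList.map Char.toNat :=
    (List.mem_map_of_injective char_toNat_injective).symm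
  have h3 : pvLowList.map Char.toNat =
      [97, 98, 99, 100, 101, 102, 103, 104, 105, 106, 107, 108, 109, 110, 111, 112, 113, 114,
       115, 116, 117, 118, 119, 120, 121, 122] := by decide
  rw [h1, h2, h3]; simp only [List.mem_cons, List.not_mem_nil, or_false]; omega

lemma mem_pvUpList (c : Char) : pUp c = true ↔ 65 ≤ c.toNat ∧ c.toNat ≤ 90 := by
  have h1 : pUp c = true ↔ c ∈ pvUpList := by simp [pUp]
  have h2 : c ∈ pvUpList ↔ c.toNat ∈ pvUpList.map Char.toNat :=
    (List.mem_map_of_injective char_toNat_injective).symm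
  have h3 : pvUpList.map Char.toNat =
      [65, 66, 67, 68, 69, 70, 71, 72, 73, 74, 75, 76, 77, 78, 79, 80, 81, 82, 83, 84, 85, 86,
       87, 88, 89, 90] := by decide
  rw [h1, h2, h3]; simp only [List.mem_cons, List.not_mem_nil, or_false]; omega

lemma isdigit_iff (c : Char) : PySem.Str.isdigit c = true ↔ 48 ≤ c.toNat ∧ c.toNat ≤ 57 := by
  simp only [PySem.Str.isdigit, PySem.Chars.isdigit, Bool.and_eq_true, decide_eq_true_eq,
    char_le_iff]
  have := tnLit
  omega

lemma mod2_bounds (x : Int) : 0 ≤ PySem.Int.mod x 2 ∧ PySem.Int.mod x 2 < 2 :=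
  ⟨PySem.Int.mod_nonneg x (by norm_num), PySem.Int.mod_lt x (by norm_num)⟩

lemma gr_low {c : Char} (h : pLow c = true) : groupRank? c = some 0 := by
  have hb := (mem_pvLowList c).mp h
  have ht := tnLit
  unfold groupRank?
  rw [if_pos ⟨(char_le_iff _ _).mpr (by omega), (char_le_iff _ _).mpr (by omega)⟩]

lemma gr_up {c : Char} (h : pUp c = true) : groupRank? c = some 1 := by
  have hb := (mem_pvUpList c).mp h
  have ht := tnLit
  unfold groupRank?
  rw [if_neg (by rintro ⟨h1, h2⟩; rw [char_le_iff] at h1; omega),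
      if_pos ⟨(char_le_iff _ _).mpr (by omega), (char_le_iff _ _).mpr (by omega)⟩]

lemma gr_dig {c : Char} (h : PySem.Str.isdigit c = true) :
    groupRank? c = if PySem.Int.mod (pvIntOf c) 2 = 1 then some 2 else some 3 := by
  have hb := (isdigit_iff c).mp h
  have ht := tnLit
  unfold groupRank?
  rw [if_neg (by rintro ⟨h1, _⟩; rw [char_le_iff] at h1; omega),
      if_neg (by rintro ⟨h1, _⟩; rw [char_le_iff] at h1; omega),
      if_pos h]
  rfl

lemma gr_odd {c : Char} (h : pOdd c = true) : groupRank? c = some 2 := by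
  rcases Bool.and_eq_true_iff.mp h with ⟨h1, h2⟩
  rw [gr_dig h1, if_pos (of_decide_eq_true h2)]

lemma gr_even {c : Char} (h : pEven c = true) : groupRank? c = some 3 := by
  rcases Bool.and_eq_true_iff.mp h with ⟨h1, h2⟩
  rw [gr_dig h1, if_neg (by have := of_decide_eq_true h2; omega)]

lemma r_bounds (c : Char) : 0 ≤ (groupRank? c).getD 0 ∧ (groupRank? c).getD 0 ≤ 3 := by
  unfold groupRank?; split_ifs <;> simp

lemma toNat_bound (c : Char) : c.toNat < 4294967296 := UInt32.toNat_lt_size _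

-- one step of A's loop, phrased with the four proof-side tests
lemma stepA_eq (acc : List Char × List Char × List Char × List Char) (x : Char) :
    pvStepA acc x = (if pLow x then acc.1 ++ [x] else acc.1,
                     if pUp x then acc.2.1 ++ [x] else acc.2.1,
                     if pOdd x then acc.2.2.1 ++ [x] else acc.2.2.1,
                     if pEven x then acc.2.2.2 ++ [x] else acc.2.2.2) := by
  simp only [pvStepA, pLow, pUp, pOdd, pEven]
  by_cases h1 : PySem.Str.isdigit x = true <;>
    by_cases h2 : PySem.Int.mod (pvIntOf x) 2 = 1 <;>
      by_cases h3 : PySem.Int.mod (pvIntOf x) 2 = 0 <;>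
        simp_all

-- A's loop with the four accumulator strings is the four filters of the character list
lemma foldA_eq (cs : List Char) (a b d e : List Char) :
    cs.foldl pvStepA (a, b, d, e)
      = (a ++ cs.filter pLow, b ++ cs.filter pUp, d ++ cs.filter pOdd, e ++ cs.filter pEven) := by
  induction cs generalizing a b d e with
  | nil => simp
  | cons x t ih =>
    rw [List.foldl_cons, stepA_eq, ih]
    simp only [List.filter_cons, Prod.mk.injEq]
    refine ⟨?_, ?_, ?_, ?_⟩ <;>
      (first
        | (by_cases hc : pLow x = true <;> simp [hc, List.append_assoc])
        | (by_cases hc : pUp x = true <;> simp [hc, List.append_assoc])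
        | (by_cases hc : pOdd x = true <;> simp [hc, List.append_assoc])
        | (by_cases hc : pEven x = true <;> simp [hc, List.append_assoc]))

-- two filters by disjoint tests, concatenated, are one filter by the disjunction
lemma filter_or_perm (p q : Char → Bool) (h : ∀ c, p c = true → q c = false) (l : List Char) :
    ((l.filter p) ++ l.filter q).Perm (l.filter (fun c => p c || q c)) := by
  induction l with
  | nil => simp
  | cons x t ih =>
    by_cases hp : p x = true
    · have hq := h x hp
      simp only [List.filter_cons, hp, hq, Bool.true_or, if_true, List.cons_append]
      exact ih.cons x
    · by_cases hqx : q x = true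
      · simp only [List.filter_cons, hp, hqx, Bool.false_or, if_true,
          Bool.false_eq_true, if_false]
        exact List.perm_middle.trans (ih.cons x)
      · simp only [List.filter_cons, hp, hqx, Bool.or_self, Bool.false_eq_true, if_false]
        exact ih

lemma beforeEq (a b : Char) :
    (decide ((groupRank? a).getD 0 < (groupRank? b).getD 0) ||
      (!decide ((groupRank? b).getD 0 < (groupRank? a).getD 0) && decide (a < b)))
    = decide (pvKey a < pvKey b) := by
  have ha := r_bounds a; have hb := r_bounds b
  have ta := toNat_bound a; have tb := toNat_bound b
  rw [Bool.eq_iff_iff]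
  simp only [Bool.or_eq_true, Bool.and_eq_true, Bool.not_eq_true', decide_eq_false_iff_not,
    decide_eq_true_eq, char_lt_iff, pvKey]
  omega

-- B's tuple-key sort is the sort by the flattened key pvKey
lemma alt_as_sorted (xs : List Char) :
    PySem.List.sorted2 xs (fun sym => (groupRank? sym).getD 0) (fun sym => sym)
      = PySem.List.sorted xs pvKey := by
  have hb : (fun a b : Char =>
        decide ((groupRank? a).getD 0 < (groupRank? b).getD 0) ||
          (!decide ((groupRank? b).getD 0 < (groupRank? a).getD 0) && decide (a < b)))
      = (fun a b : Char => decide (pvKey a < pvKey b)) := by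
    funext a b; exact beforeEq a b
  simp only [PySem.List.sorted2, PySem.List.sorted, Bool.false_eq_true, if_false, hb]

lemma keyInj : Function.Injective pvKey := by
  intro a b h
  have ha := r_bounds a; have hb := r_bounds b
  have ta := toNat_bound a; have tb := toNat_bound b
  unfold pvKey at h
  apply char_toNat_injective
  omega

-- union of the four tests = "group_rank(sym) is not None"
lemma union_eq (c : Char) :
    (((pLow c || pUp c) || pOdd c) || pEven c) = (groupRank? c).isSome := by
  by_cases hl : pLow c = true
  · simp [hl, gr_low hl]
  · by_cases hu : pUp c = true
    · simp [hl, hu, gr_up hu]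
    · have hlb : pLow c = false := Bool.eq_false_iff.mpr hl
      have hub : pUp c = false := Bool.eq_false_iff.mpr hu
      by_cases hd : PySem.Str.isdigit c = true
      · have hm := mod2_bounds (pvIntOf c)
        rw [gr_dig hd, hlb, hub]
        simp only [Bool.false_or, pOdd, pEven, hd, Bool.true_and]
        by_cases h1 : PySem.Int.mod (pvIntOf c) 2 = 1
        · simp only [h1]; decide
        · have h0 : PySem.Int.mod (pvIntOf c) 2 = 0 := by omega
          simp only [h0]; decide
      · have ht := tnLit
        have hdb : PySem.Str.isdigit c = false := Bool.eq_false_iff.mpr hd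
        have hnone : groupRank? c = none := by
          unfold groupRank?
          have n1 : ¬('a' ≤ c ∧ c ≤ 'z') := by
            rintro ⟨h1, h2⟩
            rw [char_le_iff] at h1 h2
            exact hl ((mem_pvLowList c).mpr (by omega))
          have n2 : ¬('A' ≤ c ∧ c ≤ 'Z') := by
            rintro ⟨h1, h2⟩
            rw [char_le_iff] at h1 h2
            exact hu ((mem_pvUpList c).mpr (by omega))
          rw [if_neg n1, if_neg n2, if_neg (by rw [hdb]; simp)]
        rw [hlb, hub, hnone]
        simp [pOdd, pEven, hdb]

-- a sorted block whose members all have group rank v is pairwise-sorted under pvKey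
lemma pw_block (p : Char → Bool) (v : Int) (hv : ∀ c, p c = true → groupRank? c = some v)
    (cs : List Char) :
    (PySem.List.sorted (cs.filter p) (fun c => c)).Pairwise (fun a b => pvKey a ≤ pvKey b) := by
  refine (PySem.List.sorted_pairwise (cs.filter p) (fun c => c)).imp_of_mem ?_
  intro a b ha hb hle
  rw [PySem.List.mem_sorted] at ha hb
  have hpa := (List.mem_filter.mp ha).2
  have hpb := (List.mem_filter.mp hb).2
  rw [char_le_iff] at hle
  simp only [pvKey, hv a hpa, hv b hpb, Option.getD_some]
  omega

-- members of an earlier block key-precede members of a later block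
lemma key_cross {a b : Char} {va vb : Int} (hva : groupRank? a = some va)
    (hvb : groupRank? b = some vb) (hlt : va < vb) : pvKey a ≤ pvKey b := by
  have ta := toNat_bound a; have tb := toNat_bound b
  simp only [pvKey, hva, hvb, Option.getD_some]
  omega

-- rank of a member of a sorted filtered block
lemma rank_of_mem {p : Char → Bool} {v : Int} (hv : ∀ c, p c = true → groupRank? c = some v)
    {cs : List Char} {a : Char} (ha : a ∈ PySem.List.sorted (cs.filter p) (fun c => c)) :
    groupRank? a = some v := by
  rw [PySem.List.mem_sorted] at ha
  exact hv a (List.mem_filter.mp ha).2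

-- ===== VERDICT (by name: the statement is the Claim_ definition above) =====
theorem stupid_sorted_spec : Claim_equal_stupid_sorted := by
  intro number _
  show stupid_sorted number = stupid_sorted_alt number
  set cs := number.toList with hcs
  have hd1 : ∀ c, pLow c = true → pUp c = false := by
    intro c h
    have := (mem_pvLowList c).mp h
    rw [Bool.eq_false_iff]
    intro hq; have := (mem_pvUpList c).mp hq; omega
  have hd2 : ∀ c, (pLow c || pUp c) = true → pOdd c = false := by
    intro c h
    rw [Bool.eq_false_iff]
    intro hq
    have hdig := (isdigit_iff c).mp (Bool.and_eq_true_iff.mp hq).1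
    rcases Bool.or_eq_true_iff.mp h with h | h
    · have := (mem_pvLowList c).mp h; omega
    · have := (mem_pvUpList c).mp h; omega
  have hd3 : ∀ c, ((pLow c || pUp c) || pOdd c) = true → pEven c = false := by
    intro c h
    rw [Bool.eq_false_iff]
    intro hq
    rcases Bool.and_eq_true_iff.mp hq with ⟨hdig', hq2⟩
    have hdig := (isdigit_iff c).mp hdig'
    rcases Bool.or_eq_true_iff.mp h with h | h
    · rcases Bool.or_eq_true_iff.mp h with h | h
      · have := (mem_pvLowList c).mp h; omega
      · have := (mem_pvUpList c).mp h; omega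
    · rcases Bool.and_eq_true_iff.mp h with ⟨_, h2⟩
      have := of_decide_eq_true h2
      have := of_decide_eq_true hq2
      omega
  -- reduce both ports
  simp only [stupid_sorted, stupid_sorted_alt, foldA_eq, List.nil_append, alt_as_sorted, ← hcs]
  congr 1
  -- the two character lists are equal: same multiset, both pairwise-sorted under the injective key
  apply PySem.List.eq_of_perm_of_pairwise_le_of_injective pvKey keyInj
  · -- permutation
    have e1 := PySem.List.sorted_perm (cs.filter pLow) (fun c => c) false
    have e2 := PySem.List.sorted_perm (cs.filter pUp) (fun c => c) false
    have e3 := PySem.List.sorted_perm (cs.filter pOdd) (fun c => c) false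
    have e4 := PySem.List.sorted_perm (cs.filter pEven) (fun c => c) false
    have f12 := filter_or_perm pLow pUp hd1 cs
    have f123 := filter_or_perm (fun c => pLow c || pUp c) pOdd hd2 cs
    have f1234 := filter_or_perm (fun c => (pLow c || pUp c) || pOdd c) pEven hd3 cs
    have hkept : (cs.filter (fun c => ((pLow c || pUp c) || pOdd c) || pEven c))
        = cs.filter (fun sym => (groupRank? sym).isSome) := by
      apply List.filter_congr; intro x _; exact union_eq x
    refine (((e1.append e2).append e3).append e4).trans ?_
    refine ((((f12.append (List.Perm.refl _)).trans f123).append (List.Perm.refl _)).trans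
      f1234).trans ?_
    rw [hkept]
    exact (PySem.List.sorted_perm _ pvKey false).symm
  · -- left side pairwise
    rw [List.pairwise_append, List.pairwise_append, List.pairwise_append]
    refine ⟨⟨⟨pw_block pLow 0 (fun c h => gr_low h) cs,
              pw_block pUp 1 (fun c h => gr_up h) cs, ?_⟩,
            pw_block pOdd 2 (fun c h => gr_odd h) cs, ?_⟩,
           pw_block pEven 3 (fun c h => gr_even h) cs, ?_⟩
    · intro a ha b hb
      exact key_cross (rank_of_mem (fun c h => gr_low h) ha)
        (rank_of_mem (fun c h => gr_up h) hb) (by norm_num)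
    · intro a ha b hb
      rcases List.mem_append.mp ha with ha | ha
      · exact key_cross (rank_of_mem (fun c h => gr_low h) ha)
          (rank_of_mem (fun c h => gr_odd h) hb) (by norm_num)
      · exact key_cross (rank_of_mem (fun c h => gr_up h) ha)
          (rank_of_mem (fun c h => gr_odd h) hb) (by norm_num)
    · intro a ha b hb
      rcases List.mem_append.mp ha with ha | ha
      · rcases List.mem_append.mp ha with ha | ha
        · exact key_cross (rank_of_mem (fun c h => gr_low h) ha)
            (rank_of_mem (fun c h => gr_even h) hb) (by norm_num)
        · exact key_cross (rank_of_mem (fun c h => gr_up h) ha)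
            (rank_of_mem (fun c h => gr_even h) hb) (by norm_num)
      · exact key_cross (rank_of_mem (fun c h => gr_odd h) ha)
          (rank_of_mem (fun c h => gr_even h) hb) (by norm_num)
  · -- right side pairwise
    exact PySem.List.sorted_pairwise _ pvKey
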